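-- pv_equiv track=rewrite | github.com/khoanguyen-st/SmartFAQ | apps/api/app/services/embedding_service.py | get_representative_text
-- ===== SOURCE A (Python) =====
-- from typing import List, Tuple
--
-- def get_representative_text(texts: List[str], indices: List[int]) -> Tuple[str, int]:
--     """
--     Get the most representative text from a group.
--
--     Strategy:
--     1. Prefer descriptive questions (with spaces) over acronyms
--     2. Among descriptive ones, choose shortest
--     3. Among acronyms, choose shortest
--
--     Args:
--         texts: Full list of texts
--         indices: Indices of texts in the group
--
--     Returns:
--         Tuple of (representative_text, index)
--     """
--     if not indices:
--         return "", -1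
--
--     # Get texts in this group
--     group_texts = [(texts[i], i) for i in indices]
--
--     # Separate descriptive questions from acronyms
--     descriptive = [(t, i) for t, i in group_texts if " " in t or not t.isupper()]
--     acronyms = [(t, i) for t, i in group_texts if " " not in t and t.isupper()]
--
--     # Prefer descriptive questions
--     if descriptive:
--         representative = min(descriptive, key=lambda x: len(x[0]))
--     elif acronyms:
--         representative = min(acronyms, key=lambda x: len(x[0]))
--     else:
--         representative = min(group_texts, key=lambda x: len(x[0]))
--
--     return representative[0], representative[1]
-- ===== SOURCE B (Python) =====
-- def get_representative_text(texts, indices):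
--     if not indices:
--         return "", -1
--     text, i = min(
--         ((texts[i], i) for i in indices),
--         key=lambda x: (0 if " " in x[0] or not x[0].isupper() else 1, len(x[0])),
--     )
--     return text, i
-- ===== Notes on version B (the rewrite author's own statement) =====
-- stated objective: simpler
-- what changed: The two filter passes and the descriptive/acronym/fallback branch cascade are replaced by one stable min over the group with a composite (priority, length) key, so the partitioning control flow disappears.
import Mathlib
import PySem

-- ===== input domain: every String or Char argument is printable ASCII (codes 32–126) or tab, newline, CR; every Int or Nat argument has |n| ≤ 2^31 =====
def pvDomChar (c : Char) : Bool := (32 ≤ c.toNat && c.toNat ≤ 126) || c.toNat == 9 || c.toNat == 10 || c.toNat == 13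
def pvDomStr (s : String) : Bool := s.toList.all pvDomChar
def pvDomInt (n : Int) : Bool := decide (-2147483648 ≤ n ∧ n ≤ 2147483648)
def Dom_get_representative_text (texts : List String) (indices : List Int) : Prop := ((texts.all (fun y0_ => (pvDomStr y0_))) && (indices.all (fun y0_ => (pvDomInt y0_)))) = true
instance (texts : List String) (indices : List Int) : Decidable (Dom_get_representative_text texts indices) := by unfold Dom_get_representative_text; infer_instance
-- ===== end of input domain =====

-- B replaces A's two filter passes and descriptive/acronym branch cascade by one stable min
-- over the group with a composite (priority, length) key; same return value, objective: simpler.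

-- Python's str.isupper(): at least one cased character and no lowercase one
-- (exact on the ASCII domain, where the cased characters are exactly A-Z and a-z).
def pvStrIsupper (s : String) : Bool :=
  s.toList.any PySem.Chars.isupper && s.toList.all (fun c => !PySem.Chars.islower c)

-- ===== PORT A =====
-- the .getD "" after pyGet? is unreachable under Pre_ (every index is in range)
def get_representative_text (texts : List String) (indices : List Int) : String × Int :=
  if indices = [] then ("", -1) else
  let group_texts := indices.map (fun i => ((PySem.List.pyGet? texts i).getD "", i))
  let descriptive := group_texts.filter (fun p => PySem.Str.isIn " " p.1 || !pvStrIsupper p.1)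
  let acronyms := group_texts.filter (fun p => !PySem.Str.isIn " " p.1 && pvStrIsupper p.1)
  let representative :=
    if descriptive ≠ [] then
      (PySem.List.min? descriptive (fun p => PySem.Str.len p.1)).getD ("", -1)
    else if acronyms ≠ [] then
      (PySem.List.min? acronyms (fun p => PySem.Str.len p.1)).getD ("", -1)
    else
      (PySem.List.min? group_texts (fun p => PySem.Str.len p.1)).getD ("", -1)
  (representative.1, representative.2)

-- ===== PORT B =====
def get_representative_text_alt (texts : List String) (indices : List Int) : String × Int :=
  if indices = [] then ("", -1) else
  (PySem.List.min2? (indices.map (fun i => ((PySem.List.pyGet? texts i).getD "", i)))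
      (fun p => if PySem.Str.isIn " " p.1 || !pvStrIsupper p.1 then (0 : Int) else 1)
      (fun p => PySem.Str.len p.1)).getD ("", -1)

-- ===== PRECONDITION & SPEC =====
-- exactly the inputs on which Python's texts[i] raises no IndexError
def Pre_get_representative_text (texts : List String) (indices : List Int) : Prop :=
  ∀ i ∈ indices, PySem.Raise.InRange texts.length i
instance (texts : List String) (indices : List Int) : Decidable (Pre_get_representative_text texts indices) := by unfold Pre_get_representative_text; infer_instance

def pvWitness_get_representative_text : List String × List Int := (["AB", "hello there"], [0, 1, -1])

def Spec_get_representative_text (texts : List String) (indices : List Int) (out : String × Int) : Prop := out = get_representative_text_alt texts indices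
instance (texts : List String) (indices : List Int) (out : String × Int) : Decidable (Spec_get_representative_text texts indices out) := by unfold Spec_get_representative_text; infer_instance

-- ===== CLAIM (what is proved, stated in full; the proofs are below) =====
def Claim_equal_get_representative_text : Prop := ∀ (texts : List String) (indices : List Int), Dom_get_representative_text texts indices → Pre_get_representative_text texts indices → Spec_get_representative_text texts indices (get_representative_text texts indices)

-- ===== LEMMAS AND PROOFS =====

-- the one-step accumulator update of min2? with the composite (priority, length) key
def pvStep2 {α : Type} (pred : α → Bool) (k2 : α → Int) (acc : Option α) (x : α) : Option α :=
  match acc with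
  | none => some x
  | some m =>
    if (decide ((if pred x then (0:Int) else 1) < (if pred m then (0:Int) else 1)) ||
        !decide ((if pred m then (0:Int) else 1) < (if pred x then (0:Int) else 1)) &&
        decide (k2 x < k2 m)) = true then some x else some m

-- the one-step accumulator update of min? with the length key
def pvStepA {α : Type} (k2 : α → Int) (acc : Option α) (x : α) : Option α :=
  match acc with
  | none => some x
  | some m => if k2 x < k2 m then some x else some m

theorem pvMin2_eq_foldl {α : Type} (pred : α → Bool) (k2 : α → Int) (L : List α) :
    PySem.List.min2? L (fun p => if pred p then (0:Int) else 1) k2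
      = L.foldl (pvStep2 pred k2) none := rfl

theorem pvMin_eq_foldl {α : Type} (k2 : α → Int) (L : List α) :
    PySem.List.min? L k2 = L.foldl (pvStepA k2) none := rfl

theorem pvStep2_pp {α : Type} (pred : α → Bool) (k2 : α → Int) {m x : α}
    (hx : pred x = true) (hm : pred m = true) :
    pvStep2 pred k2 (some m) x = pvStepA k2 (some m) x := by
  simp [pvStep2, pvStepA, hx, hm]

theorem pvStep2_pn {α : Type} (pred : α → Bool) (k2 : α → Int) {m x : α}
    (hx : pred x = true) (hm : pred m = false) :
    pvStep2 pred k2 (some m) x = some x := by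
  simp [pvStep2, hx, hm]

theorem pvStep2_np {α : Type} (pred : α → Bool) (k2 : α → Int) {m x : α}
    (hx : pred x = false) (hm : pred m = true) :
    pvStep2 pred k2 (some m) x = some m := by
  simp [pvStep2, hx, hm]

theorem pvStep2_nn {α : Type} (pred : α → Bool) (k2 : α → Int) {m x : α}
    (hx : pred x = false) (hm : pred m = false) :
    pvStep2 pred k2 (some m) x = pvStepA k2 (some m) x := by
  simp [pvStep2, pvStepA, hx, hm]

-- once the accumulator holds a priority-0 (descriptive) element, priority-1 elements lose
-- on priority and the fold is the plain length-min fold over the descriptive elements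
theorem pv_fold2_of_pred {α : Type} (pred : α → Bool) (k2 : α → Int) :
    ∀ (L : List α) (m : α), pred m = true →
    L.foldl (pvStep2 pred k2) (some m) = (L.filter pred).foldl (pvStepA k2) (some m) := by
  intro L
  induction L with
  | nil => intro m hm; rfl
  | cons x t ih =>
    intro m hm
    by_cases hx : pred x = true
    · rw [List.foldl_cons, pvStep2_pp pred k2 hx hm, List.filter_cons_of_pos hx, List.foldl_cons]
      by_cases hk : k2 x < k2 m
      · simp only [pvStepA, hk, if_true]; exact ih x hx
      · simp only [pvStepA, hk, if_false]; exact ih m hm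
    · rw [Bool.not_eq_true] at hx
      rw [List.foldl_cons, pvStep2_np pred k2 hx hm, List.filter_cons_of_neg (by simp [hx])]
      exact ih m hm

-- starting from an empty or non-descriptive accumulator, the composite-key min fold is the
-- length-min fold over the descriptive elements when there are any, else over the whole list
theorem pv_fold2_split {α : Type} (pred : α → Bool) (k2 : α → Int) :
    ∀ (L : List α) (g : Option α), (∀ m, g = some m → pred m = false) →
    L.foldl (pvStep2 pred k2) g
    = (if L.filter pred = [] then L.foldl (pvStepA k2) g
       else (L.filter pred).foldl (pvStepA k2) none) := by
  intro L
  induction L with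
  | nil => intro g hg; simp
  | cons x t ih =>
    intro g hg
    by_cases hx : pred x = true
    · have hacc : pvStep2 pred k2 g x = some x := by
        cases g with
        | none => rfl
        | some m => exact pvStep2_pn pred k2 hx (hg m rfl)
      rw [List.foldl_cons, hacc, pv_fold2_of_pred pred k2 t x hx,
        List.filter_cons_of_pos hx]
      simp only [List.cons_ne_nil, if_false, List.foldl_cons]
      rfl
    · rw [Bool.not_eq_true] at hx
      have hacc : pvStep2 pred k2 g x = pvStepA k2 g x := by
        cases g with
        | none => rfl
        | some m => exact pvStep2_nn pred k2 hx (hg m rfl)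
      have hacc' : ∀ m, pvStepA k2 g x = some m → pred m = false := by
        intro m hm
        cases g with
        | none => simp [pvStepA] at hm; subst hm; exact hx
        | some mm =>
          by_cases hk : k2 x < k2 mm
          · simp only [pvStepA, hk, if_true, Option.some.injEq] at hm
            subst hm; exact hx
          · simp only [pvStepA, hk, if_false, Option.some.injEq] at hm
            subst hm; exact hg mm rfl
      rw [List.foldl_cons, hacc, List.filter_cons_of_neg (by simp [hx]), List.foldl_cons]
      exact ih (pvStepA k2 g x) hacc'

-- ===== VERDICT (by name: the statement is the Claim_ definition above) =====
theorem get_representative_text_spec : Claim_equal_get_representative_text := by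
  intro texts indices _ _
  show get_representative_text texts indices = get_representative_text_alt texts indices
  by_cases hnil : indices = []
  · subst hnil; rfl
  · unfold get_representative_text get_representative_text_alt
    rw [if_neg hnil, if_neg hnil]
    set L := indices.map (fun i => ((PySem.List.pyGet? texts i).getD "", i)) with hLdef
    have hLne : L ≠ [] := by
      simp [hLdef, List.map_eq_nil_iff, hnil]
    set pred : String × Int → Bool :=
      fun p => PySem.Str.isIn " " p.1 || !pvStrIsupper p.1 with hpred
    have hmin2 : PySem.List.min2? L
        (fun p => if pred p then (0 : Int) else 1)
        (fun p => PySem.Str.len p.1)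
      = (if L.filter pred = [] then
          PySem.List.min? L (fun p => PySem.Str.len p.1)
        else
          PySem.List.min? (L.filter pred) (fun p => PySem.Str.len p.1)) := by
      rw [pvMin2_eq_foldl, pvMin_eq_foldl, pvMin_eq_foldl]
      exact pv_fold2_split pred (fun p => PySem.Str.len p.1) L none (by intro m hm; cases hm)
    rw [hmin2]
    dsimp only
    by_cases hd : L.filter pred = []
    · have hall : ∀ p ∈ L, pred p = false := by
        intro p hp
        have := List.filter_eq_nil_iff.mp hd p hp
        simpa using this
      have hacr' : L.filter (fun p => !PySem.Str.isIn " " p.1 && pvStrIsupper p.1) = L := by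
        apply List.filter_eq_self.mpr
        intro p hp
        have h1 := hall p hp
        rw [hpred] at h1
        simp only [Bool.or_eq_false_iff, Bool.not_eq_false'] at h1
        show (!PySem.Str.isIn " " p.1 && pvStrIsupper p.1) = true
        rw [h1.1, h1.2]
        rfl
      rw [if_pos hd, if_neg (fun h => h hd), hacr', if_pos hLne]
    · rw [if_neg hd, if_pos hd]
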